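-- pv_equiv track=rewrite | github.com/SGupta101/AI | Sudoku Part 1.py | get_symbol_set
-- ===== SOURCE A (Python) =====
-- def get_symbol_set(size):
--     sorted_values = set()
--     abc = ["A", "B", "C", "D", "E", "F", "G", "H", "I", "J", "K", "L", "M", "N", "O"]
--     if size > 9:
--         for j in range(1, 10):
--             sorted_values.add(str(j))
--         for j in range(0, size - 9):
--             sorted_values.add(abc[j])
--     else:
--         for j in range(1, size + 1):
--             sorted_values.add(str(j))
--     return sorted_values
-- ===== SOURCE B (Python) =====
-- def get_symbol_set(size):
--     # Recursive decomposition: the set for `size` is the set for `size-1`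
--     # plus the symbol with index size-1, computed arithmetically (no table,
--     # no size>9 branch): digits 1..9 then letters from 'A' by chr arithmetic.
--     if size <= 0:
--         return set()
--     result = get_symbol_set(size - 1)
--     j = size - 1
--     result.add(str(j + 1) if j < 9 else chr(ord("A") + j - 9))
--     return result
-- ===== Notes on version B (the rewrite author's own statement) =====
-- stated objective: simpler
-- what changed: Replaces A's size>9 branch with its two staged loops over a digit range and a letter table by a single structural recursion on size that computes each symbol arithmetically with chr/str (no symbol table, no digit-vs-letter size branch).
import Mathlib
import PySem

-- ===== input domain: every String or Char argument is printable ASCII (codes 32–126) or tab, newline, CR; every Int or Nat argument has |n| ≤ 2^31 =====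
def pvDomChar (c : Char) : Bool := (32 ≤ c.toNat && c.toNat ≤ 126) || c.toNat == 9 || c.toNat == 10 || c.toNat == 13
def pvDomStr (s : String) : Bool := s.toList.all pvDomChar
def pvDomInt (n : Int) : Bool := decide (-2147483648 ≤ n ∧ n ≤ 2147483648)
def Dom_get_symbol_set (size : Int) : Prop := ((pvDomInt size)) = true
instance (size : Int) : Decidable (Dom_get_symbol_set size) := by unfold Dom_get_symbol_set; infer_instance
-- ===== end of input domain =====

-- B replaces A's size>9 branch and its two staged loops (digit range + letter table) by one
-- structural recursion on size computing each symbol arithmetically ('simpler').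

-- ===== PORT A =====
def get_symbol_set (size : Int) : List String :=
  let sorted_values : PySem.Set String := PySem.Set.empty
  let abc : List String := ["A", "B", "C", "D", "E", "F", "G", "H", "I", "J", "K", "L", "M", "N", "O"]
  if size > 9 then
    let sv1 := (PySem.List.pyRange 1 10 1).foldl
      (fun s j => PySem.Set.add s (PySem.Int.toStr j)) sorted_values
    (PySem.List.pyRange 0 (size - 9) 1).foldl
      (fun s j => PySem.Set.add s ((PySem.List.pyGet? abc j).getD "")) sv1
  else
    (PySem.List.pyRange 1 (size + 1) 1).foldl
      (fun s j => PySem.Set.add s (PySem.Int.toStr j)) sorted_values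

-- ===== PORT B =====
-- B's Python recursion on `size` (base case size <= 0) is transcribed as structural
-- recursion on the natural number size.toNat; each step adds the symbol with index j = size-1.
def get_symbol_set_alt_go : Nat → PySem.Set String
  | 0 => PySem.Set.empty
  | n + 1 =>
    let result := get_symbol_set_alt_go n
    let j : Int := (n : Int)
    PySem.Set.add result
      (if j < 9 then PySem.Int.toStr (j + 1)
       else String.ofList [Char.ofNat (65 + (j - 9)).toNat])

def get_symbol_set_alt (size : Int) : List String :=
  if size ≤ 0 then PySem.Set.empty else get_symbol_set_alt_go size.toNat

-- ===== PRECONDITION & SPEC =====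
-- A raises IndexError (abc[j] out of range) when size >= 25; Pre_ excludes exactly those inputs.
def Pre_get_symbol_set (size : Int) : Prop := size ≤ 24
instance (size : Int) : Decidable (Pre_get_symbol_set size) := by unfold Pre_get_symbol_set; infer_instance
def pvWitness_get_symbol_set : Int := (12)
def Spec_get_symbol_set (size : Int) (out : List String) : Prop := out = get_symbol_set_alt size
instance (size : Int) (out : List String) : Decidable (Spec_get_symbol_set size out) := by unfold Spec_get_symbol_set; infer_instance

-- ===== CLAIM (what is proved, stated in full; the proofs are below) =====
def Claim_equal_get_symbol_set : Prop := ∀ (size : Int), Dom_get_symbol_set size → Pre_get_symbol_set size → Spec_get_symbol_set size (get_symbol_set size)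

-- ===== LEMMAS AND PROOFS =====
theorem both_empty_of_nonpos (size : Int) (h : size ≤ 0) :
    get_symbol_set size = get_symbol_set_alt size := by
  simp [get_symbol_set, get_symbol_set_alt, if_pos h,
    PySem.List.pyRange_one_eq_nil (a := 1) (b := size + 1) (by omega),
    if_neg (by omega : ¬ size > 9)]

-- ===== VERDICT (by name: the statement is the Claim_ definition above) =====
theorem get_symbol_set_spec : Claim_equal_get_symbol_set := by
  intro size _ hpre
  unfold Spec_get_symbol_set
  by_cases hneg : size ≤ 0
  · exact both_empty_of_nonpos size hneg
  · have h0 : 0 ≤ size := by omega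
    have h24 : size ≤ 24 := hpre
    interval_cases size <;> decide
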